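-- pv_equiv track=rewrite | github.com/Vivian-Green/tatoclip | metadata_handler.py | get_raw_index
-- ===== SOURCE A (Python) =====
-- def get_raw_index(data, effective_index):
--     """Convert effective index to raw index considering offsets"""
--     if not data or not isinstance(data, list) or len(data) == 0:
--         return effective_index
--
--     metadata = data[0]
--     offsets = metadata.get("offsets", {})
--
--     # Handle negative effective indices (skipped videos)
--     if effective_index < 0:
--         # Build list of all skipped raw indices
--         skipped_indices = []
--         current_raw = 1
--         current_effective = 1
--
--         # Convert offsets to sorted list and process
--         offset_points = []
--         for k, v in offsets.items():
--             try:
--                 offset_points.append((int(k), int(v)))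
--             except (ValueError, TypeError):
--                 continue
--         offset_points.sort(key=lambda x: x[0])
--
--         for effective_threshold, shift in offset_points:
--             # Add all videos up to this threshold
--             while current_effective < effective_threshold:
--                 current_raw += 1
--                 current_effective += 1
--
--             # Skip the specified number of videos
--             for i in range(shift):
--                 skipped_indices.append(current_raw + i)
--
--             current_raw += shift
--
--         # Return the corresponding skipped index for negative effective
--         idx = -effective_index - 1
--         return skipped_indices[idx] if idx < len(skipped_indices) else None
--
--     # For positive effective indices, calculate the corresponding raw index
--     offset_points = []
--     for k, v in offsets.items():
--         try:
--             offset_points.append((int(k), int(v)))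
--         except (ValueError, TypeError):
--             continue
--     offset_points.sort(key=lambda x: x[0])
--
--     raw_index = effective_index
--     total_shift = 0
--
--     for effective_threshold, shift in offset_points:
--         if effective_index >= effective_threshold:
--             total_shift += shift
--         else:
--             break
--
--     return effective_index + total_shift
-- ===== SOURCE B (Python) =====
-- def _parse_int(x):
--     try:
--         return int(x)
--     except (ValueError, TypeError):
--         return None
--
--
-- def get_raw_index(data, effective_index):
--     """Convert effective index to raw index considering offsets"""
--     if not data or not isinstance(data, list) or len(data) == 0:
--         return effective_index
--
--     offsets = data[0].get("offsets", {})
--     points = [(k, v)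
--               for k, v in ((_parse_int(k), _parse_int(v)) for k, v in offsets.items())
--               if k is not None and v is not None]
--
--     if effective_index >= 0:
--         # shift is the sum of all offsets whose threshold has been reached
--         return effective_index + sum(s for t, s in points if t <= effective_index)
--
--     # negative index: walk the per-offset skipped segments without building the list
--     idx = -effective_index - 1
--     eff = 1
--     shift = 0
--     for t, s in sorted(points, key=lambda p: p[0]):
--         if t > eff:
--             eff = t
--         start = eff + shift
--         if s > 0:
--             if idx < s:
--                 return start + idx
--             idx -= s
--         shift += s
--     return None
-- ===== Notes on version B (the rewrite author's own statement) =====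
-- stated objective: alternative
-- what changed: For negative indices B replaces A's one-step walk that materialises every skipped raw index with a per-offset segment scan that never builds the list, and for non-negative indices B drops the sort and sums the applicable shifts in one unsorted pass.
import Mathlib
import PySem

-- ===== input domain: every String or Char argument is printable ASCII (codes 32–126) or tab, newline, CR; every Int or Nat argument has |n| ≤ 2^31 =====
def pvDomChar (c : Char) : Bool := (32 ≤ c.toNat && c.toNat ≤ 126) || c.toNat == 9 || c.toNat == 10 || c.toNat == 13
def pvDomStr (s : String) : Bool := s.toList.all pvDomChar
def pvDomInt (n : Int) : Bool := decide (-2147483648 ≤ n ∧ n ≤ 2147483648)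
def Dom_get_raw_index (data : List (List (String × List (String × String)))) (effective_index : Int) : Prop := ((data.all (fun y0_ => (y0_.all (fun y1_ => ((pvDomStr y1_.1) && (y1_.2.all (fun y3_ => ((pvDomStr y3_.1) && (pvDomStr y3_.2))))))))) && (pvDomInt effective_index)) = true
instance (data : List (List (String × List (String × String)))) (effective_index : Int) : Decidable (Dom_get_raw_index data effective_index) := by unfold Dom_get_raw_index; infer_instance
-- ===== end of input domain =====

-- B replaces A's one-step walk that materialises every skipped raw index with a
-- per-offset segment scan that builds no list, and drops the sort for non-negative indices.

-- shared helper: metadata.get("offsets", {}) — first-match lookup in the association list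
def pvGetOffsets (metadata : List (String × List (String × String))) : List (String × String) :=
  match metadata.find? (fun kv => kv.1 == "offsets") with
  | some kv => kv.2
  | none => []

-- ===== PORT A =====
-- the offsets.items() loop: append (int(k), int(v)), skip pairs where int() raises
def pvA_parse (offsets : List (String × String)) : List (Int × Int) :=
  offsets.foldl (fun acc kv =>
    match PySem.Int.ofStr? kv.1, PySem.Int.ofStr? kv.2 with
    | some k, some v => acc ++ [(k, v)]
    | _, _ => acc) []

-- 'while current_effective < effective_threshold: current_raw += 1; current_effective += 1'
def pvA_walk (raw eff t : Int) : Int × Int :=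
  if eff < t then pvA_walk (raw + 1) (eff + 1) t else (raw, eff)
termination_by (t - eff).toNat
decreasing_by omega

-- the 'for effective_threshold, shift in offset_points' loop of the negative branch
def pvA_negLoop : List (Int × Int) → List Int → Int → Int → List Int
  | [], sk, _, _ => sk
  | (t, s) :: rest, sk, raw, eff =>
    let p := pvA_walk raw eff t
    let sk' := (PySem.List.pyRange 0 s 1).foldl (fun acc i => acc ++ [p.1 + i]) sk
    pvA_negLoop rest sk' (p.1 + s) p.2

-- the positive-branch loop with its break
def pvA_shiftLoop (ei : Int) : List (Int × Int) → Int → Int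
  | [], total => total
  | (t, s) :: rest, total => if ei ≥ t then pvA_shiftLoop ei rest (total + s) else total

def get_raw_index (data : List (List (String × List (String × String)))) (effective_index : Int) : Option Int :=
  match data with
  | [] => some effective_index
  | metadata :: _ =>
    let offsets := pvGetOffsets metadata
    if effective_index < 0 then
      let pts := PySem.List.sorted (pvA_parse offsets) (fun p => p.1) false
      let sk := pvA_negLoop pts [] 1 1
      let idx := -effective_index - 1
      if idx < (sk.length : Int) then PySem.List.pyGet? sk idx else none
    else
      let pts := PySem.List.sorted (pvA_parse offsets) (fun p => p.1) false
      some (effective_index + pvA_shiftLoop effective_index pts 0)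

-- ===== PORT B =====
-- the filtering comprehension over ((_parse_int(k), _parse_int(v)) for k, v in offsets.items())
def pvB_parse (offsets : List (String × String)) : List (Int × Int) :=
  offsets.filterMap (fun kv =>
    match PySem.Int.ofStr? kv.1, PySem.Int.ofStr? kv.2 with
    | some k, some v => some (k, v)
    | _, _ => none)

-- the segment scan of Source B's negative branch
def pvB_negLoop : List (Int × Int) → Int → Int → Int → Option Int
  | [], _, _, _ => none
  | (t, s) :: rest, idx, eff, shift =>
    let eff' := if t > eff then t else eff
    let start := eff' + shift
    if s > 0 then
      if idx < s then some (start + idx)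
      else pvB_negLoop rest (idx - s) eff' (shift + s)
    else pvB_negLoop rest idx eff' (shift + s)

def get_raw_index_alt (data : List (List (String × List (String × String)))) (effective_index : Int) : Option Int :=
  match data with
  | [] => some effective_index
  | metadata :: _ =>
    let points := pvB_parse (pvGetOffsets metadata)
    if effective_index ≥ 0 then
      some (effective_index + ((points.filter (fun p => p.1 ≤ effective_index)).map (fun p => p.2)).sum)
    else
      pvB_negLoop (PySem.List.sorted points (fun p => p.1) false) (-effective_index - 1) 1 0

-- ===== PRECONDITION & SPEC =====
def Spec_get_raw_index (data : List (List (String × List (String × String)))) (effective_index : Int) (out : Option Int) : Prop := out = get_raw_index_alt data effective_index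
instance (data : List (List (String × List (String × String)))) (effective_index : Int) (out : Option Int) : Decidable (Spec_get_raw_index data effective_index out) := by unfold Spec_get_raw_index; infer_instance

-- ===== CLAIM (what is proved, stated in full; the proofs are below) =====
def Claim_equal_get_raw_index : Prop := ∀ (data : List (List (String × List (String × String)))) (effective_index : Int), Dom_get_raw_index data effective_index → Spec_get_raw_index data effective_index (get_raw_index data effective_index)

-- ===== LEMMAS AND PROOFS =====

theorem pvA_parse_aux (offsets : List (String × String)) (acc : List (Int × Int)) :
    offsets.foldl (fun acc kv =>
      match PySem.Int.ofStr? kv.1, PySem.Int.ofStr? kv.2 with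
      | some k, some v => acc ++ [(k, v)]
      | _, _ => acc) acc = acc ++ pvB_parse offsets := by
  induction offsets generalizing acc with
  | nil => simp [pvB_parse]
  | cons kv rest ih =>
    simp only [List.foldl_cons, pvB_parse, List.filterMap_cons]
    cases h1 : PySem.Int.ofStr? kv.1 <;> cases h2 : PySem.Int.ofStr? kv.2 <;>
      simp [ih, pvB_parse]

theorem pvA_parse_eq (offsets : List (String × String)) : pvA_parse offsets = pvB_parse offsets := by
  unfold pvA_parse
  rw [pvA_parse_aux]
  simp

theorem pvA_shiftLoop_eq (ei : Int) (pts : List (Int × Int)) (acc : Int)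
    (hs : pts.Pairwise (fun a b => a.1 ≤ b.1)) :
    pvA_shiftLoop ei pts acc = acc + ((pts.filter (fun p => p.1 ≤ ei)).map (fun p => p.2)).sum := by
  induction pts generalizing acc with
  | nil => simp [pvA_shiftLoop]
  | cons p rest ih =>
    obtain ⟨t, s⟩ := p
    rcases List.pairwise_cons.mp hs with ⟨hhead, htail⟩
    by_cases h : t ≤ ei
    · have hge : ei ≥ t := h
      simp only [pvA_shiftLoop, hge, if_pos, List.filter_cons]
      rw [ih (acc + s) htail]
      simp
      ring
    · simp only [pvA_shiftLoop, List.filter_cons]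
      have hge : ¬ ei ≥ t := by omega
      rw [if_neg hge]
      have hrest : rest.filter (fun p => p.1 ≤ ei) = [] := by
        apply List.filter_eq_nil_iff.mpr
        intro q hq
        have := hhead q hq
        simp only [decide_eq_true_eq]
        omega
      simp [h, hrest]

theorem pvA_walk_eq (raw eff t : Int) :
    pvA_walk raw eff t = (raw + (max t eff - eff), max t eff) := by
  by_cases h : eff < t
  · rw [pvA_walk, if_pos h, pvA_walk_eq (raw + 1) (eff + 1) t]
    rw [Prod.mk.injEq]
    exact ⟨by omega, by omega⟩
  · rw [pvA_walk, if_neg h]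
    rw [Prod.mk.injEq]
    exact ⟨by omega, by omega⟩
termination_by (t - eff).toNat
decreasing_by omega

-- one segment of skipped raw indices, as A appends it
def pvSeg (start s : Int) : List Int := (PySem.List.pyRange 0 s 1).map (fun i => start + i)

theorem pvA_negLoop_cons (t s : Int) (rest : List (Int × Int)) (sk : List Int) (raw eff : Int) :
    pvA_negLoop ((t, s) :: rest) sk raw eff =
      pvA_negLoop rest (sk ++ pvSeg (raw + (max t eff - eff)) s) (raw + (max t eff - eff) + s) (max t eff) := by
  simp only [pvA_negLoop, pvA_walk_eq, pvSeg, PySem.List.foldl_append_singleton_eq_map]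

theorem pvA_negLoop_acc (pts : List (Int × Int)) (sk : List Int) (raw eff : Int) :
    pvA_negLoop pts sk raw eff = sk ++ pvA_negLoop pts [] raw eff := by
  induction pts generalizing sk raw eff with
  | nil => simp [pvA_negLoop]
  | cons p rest ih =>
    obtain ⟨t, s⟩ := p
    rw [pvA_negLoop_cons, pvA_negLoop_cons, ih, ih (([] : List Int) ++ _)]
    simp

theorem pvSeg_length (start s : Int) : (pvSeg start s).length = s.toNat := by
  simp [pvSeg, PySem.List.length_pyRange_one]

theorem pvSeg_getElem? (start s : Int) (idx : Int) (h0 : 0 ≤ idx) (h : idx < s) :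
    (pvSeg start s)[idx.toNat]? = some (start + idx) := by
  unfold pvSeg
  rw [PySem.List.pyRange_one]
  have hlt : idx.toNat < (s - 0).toNat := by omega
  rw [List.getElem?_map, List.getElem?_map, List.getElem?_range hlt]
  simp
  omega

theorem pvNeg_main (pts : List (Int × Int)) (idx eff shift : Int) (h0 : 0 ≤ idx) :
    pvB_negLoop pts idx eff shift = (pvA_negLoop pts [] (eff + shift) eff)[idx.toNat]? := by
  induction pts generalizing idx eff shift with
  | nil => simp [pvB_negLoop, pvA_negLoop]
  | cons p rest ih =>
    obtain ⟨t, s⟩ := p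
    have heff : (if t > eff then t else eff) = max t eff := by split <;> omega
    rw [pvA_negLoop_cons, pvA_negLoop_acc, List.nil_append]
    have hraw : eff + shift + (max t eff - eff) = max t eff + shift := by omega
    rw [hraw]
    simp only [pvB_negLoop, heff]
    by_cases hs : s > 0
    · rw [if_pos hs]
      by_cases hidx : idx < s
      · rw [if_pos hidx]
        rw [List.getElem?_append_left (by rw [pvSeg_length]; omega)]
        rw [pvSeg_getElem? _ _ _ h0 hidx]
      · rw [if_neg hidx]
        rw [ih (idx - s) (max t eff) (shift + s) (by omega)]
        rw [List.getElem?_append_right (by rw [pvSeg_length]; omega)]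
        rw [pvSeg_length]
        have h1 : idx.toNat - s.toNat = (idx - s).toNat := by omega
        have h2 : max t eff + (shift + s) = max t eff + shift + s := by omega
        rw [h1, h2]
    · rw [if_neg hs]
      have hseg : pvSeg (max t eff + shift) s = [] := by
        unfold pvSeg
        rw [PySem.List.pyRange_one_eq_nil (by omega)]
        rfl
      rw [ih idx (max t eff) (shift + s) h0]
      rw [hseg, List.nil_append]
      have h2 : max t eff + (shift + s) = max t eff + shift + s := by omega
      rw [h2]

theorem pvGuard_getElem? (sk : List Int) (idx : Int) (h0 : 0 ≤ idx) :
    (if idx < (sk.length : Int) then PySem.List.pyGet? sk idx else none) = sk[idx.toNat]? := by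
  by_cases h : idx < (sk.length : Int)
  · rw [if_pos h, PySem.List.pyGet?_of_nonneg sk h0]
  · rw [if_neg h]
    symm
    rw [List.getElem?_eq_none_iff]
    omega

-- ===== VERDICT (by name: the statement is the Claim_ definition above) =====
theorem get_raw_index_spec : Claim_equal_get_raw_index := by
  intro data ei _
  unfold Spec_get_raw_index get_raw_index get_raw_index_alt
  match data with
  | [] => rfl
  | metadata :: _ =>
    simp only
    rw [pvA_parse_eq]
    by_cases hneg : ei < 0
    · have hge : ¬ ei ≥ 0 := by omega
      rw [if_pos hneg, if_neg hge]
      rw [pvGuard_getElem? _ _ (by omega)]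
      have := pvNeg_main (PySem.List.sorted (pvB_parse (pvGetOffsets metadata)) (fun p => p.1) false)
        (-ei - 1) 1 0 (by omega)
      rw [show (1 : Int) + 0 = 1 by omega] at this
      rw [this]
    · have hge : ei ≥ 0 := by omega
      rw [if_neg hneg, if_pos hge]
      congr 1
      rw [pvA_shiftLoop_eq ei _ 0
        (PySem.List.sorted_pairwise (pvB_parse (pvGetOffsets metadata)) (fun p => p.1))]
      rw [zero_add]
      have hperm : ((PySem.List.sorted (pvB_parse (pvGetOffsets metadata)) (fun p => p.1) false).filter
          (fun p => p.1 ≤ ei)).Perm ((pvB_parse (pvGetOffsets metadata)).filter (fun p => p.1 ≤ ei)) :=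
        (PySem.List.sorted_perm _ _ _).filter _
      rw [List.Perm.sum_eq (hperm.map _)]
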